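-- pv_equiv track=rewrite | github.com/mirageoasis/ndbCoding | boj/23304_2.py | if_pan
-- ===== SOURCE A (Python) =====
-- def if_pan(string):
--     if len(string) == 1:
--         return True
--     for i in range(0, len(string)):
--         if string[i] != string[len(string)-i-1]:
--             return False
--     front=string[:len(string)//2]
--     back=""
--     if len(string) % 2 ==0:
--         back=string[len(string)//2:]
--     else:
--         back=string[len(string)//2+1:]
--     return if_pan(front) & if_pan(back)
-- ===== SOURCE B (Python) =====
-- def if_pan(string):
--     half = string
--     while len(half) > 1:
--         if half != half[::-1]:
--             return False
--         half = half[:len(half) // 2]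
--     return True
-- ===== Notes on version B (the rewrite author's own statement) =====
-- stated objective: faster
-- what changed: Replaced A's two-branch recursion (which re-checks both mirror halves at every level) by a single halving loop over the front half only, using the fact that after a passed palindrome check the back half is the reverse of the front half.
-- outside the precondition, e.g. on if_pan(''): A raises RecursionError, B returns True
-- crash fix: A raises RecursionError on the empty string (it recurses on '' forever); B returns True there. — e.g. on if_pan(""): A raises RecursionError, B returns true
import Mathlib
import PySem

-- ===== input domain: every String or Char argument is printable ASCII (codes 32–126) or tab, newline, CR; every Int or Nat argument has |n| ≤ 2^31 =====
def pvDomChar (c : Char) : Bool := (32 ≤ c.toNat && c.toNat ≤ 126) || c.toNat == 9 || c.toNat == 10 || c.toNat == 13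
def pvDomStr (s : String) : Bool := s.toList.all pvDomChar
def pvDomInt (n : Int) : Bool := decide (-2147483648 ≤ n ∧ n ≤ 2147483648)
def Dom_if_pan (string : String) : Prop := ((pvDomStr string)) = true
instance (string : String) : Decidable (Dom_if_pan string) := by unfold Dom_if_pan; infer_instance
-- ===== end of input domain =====

-- B replaces A's two-branch recursion (O(n log n)) by a single halving loop that only
-- follows the front half, since the back half mirrors it once the palindrome check passed.

-- ===== PORT A =====
-- the `for i in range(len(string))` mismatch scan: True iff no index mismatches
def pvCheckA (l : List Char) : Bool :=
  (PySem.List.pyRange 0 (PySem.List.len l) 1).all fun i =>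
    PySem.List.pyGet? l i == PySem.List.pyGet? l (PySem.List.len l - i - 1)

-- front = string[:len(string)//2]
def pvFrontA (l : List Char) : List Char :=
  PySem.List.slice l none (some (PySem.Int.floordiv (PySem.List.len l) 2))

-- back = string[len//2:] if len even else string[len//2+1:]
def pvBackA (l : List Char) : List Char :=
  if PySem.Int.mod (PySem.List.len l) 2 == 0 then
    PySem.List.slice l (some (PySem.Int.floordiv (PySem.List.len l) 2)) none
  else
    PySem.List.slice l (some (PySem.Int.floordiv (PySem.List.len l) 2 + 1)) none

-- fuel makes the recursion total; Python recurses unboundedly (RecursionError) only on "",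
-- which Pre_if_pan excludes; inside Pre_ fuel = length+1 is never exhausted
def pvPanA (fuel : Nat) (l : List Char) : Bool :=
  match fuel with
  | 0 => true
  | f + 1 =>
    if l.length == 1 then true
    else if pvCheckA l then pvPanA f (pvFrontA l) && pvPanA f (pvBackA l)
    else false

def if_pan (string : String) : Bool := pvPanA (string.toList.length + 1) string.toList

-- ===== PORT B =====
-- the while loop of Source B; half[::-1] is List.reverse (PySem.List.slice?_none_none_neg_one),
-- half[:len(half)//2] is take (length/2) (PySem.List.slice_to_natCast)
def pvPanB (half : List Char) : Bool :=
  if 1 < half.length then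
    if half ≠ half.reverse then false
    else pvPanB (half.take (half.length / 2))
  else true
termination_by half.length
decreasing_by simp; omega

def if_pan_alt (string : String) : Bool := pvPanB string.toList

-- ===== PRECONDITION & SPEC =====
-- Pre_ excludes only the empty string, on which A recurses forever (RecursionError)
def Pre_if_pan (string : String) : Prop := string ≠ ""
instance (string : String) : Decidable (Pre_if_pan string) := by unfold Pre_if_pan; infer_instance
def pvWitness_if_pan : String := "abab"

-- A raises RecursionError exactly on the empty string; B returns True there
def Raises_if_pan (string : String) : Prop := string = ""
instance (string : String) : Decidable (Raises_if_pan string) := by unfold Raises_if_pan; infer_instance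
def pvRaiseWitness_if_pan : String := ""
def pvRaiseWitnessOut_if_pan : Bool := true

def Spec_if_pan (string : String) (out : Bool) : Prop := out = if_pan_alt string
instance (string : String) (out : Bool) : Decidable (Spec_if_pan string out) := by unfold Spec_if_pan; infer_instance

-- ===== CLAIM (what is proved, stated in full; the proofs are below) =====
def Claim_equal_if_pan : Prop := ∀ (string : String), Dom_if_pan string → Pre_if_pan string → Spec_if_pan string (if_pan string)
def Claim_raises_if_pan : Prop := (∀ (string : String), Dom_if_pan string → Raises_if_pan string → ¬ Pre_if_pan string) ∧ (Dom_if_pan (pvRaiseWitness_if_pan) ∧ Raises_if_pan (pvRaiseWitness_if_pan) ∧ if_pan_alt (pvRaiseWitness_if_pan) = pvRaiseWitnessOut_if_pan)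

-- ===== LEMMAS AND PROOFS =====

theorem pvFrontA_eq (l : List Char) : pvFrontA l = l.take (l.length / 2) := by
  simp [pvFrontA, PySem.List.len_eq]
  rw [show ((l.length : Int) / 2) = ((l.length / 2 : Nat) : Int) by omega,
    PySem.List.slice_to_natCast]

theorem pvBackA_eq (l : List Char) : pvBackA l = l.drop ((l.length + 1) / 2) := by
  unfold pvBackA
  rw [PySem.List.len_eq,
    show PySem.Int.mod (l.length : Int) 2 = ((l.length % 2 : Nat) : Int) from by
      exact_mod_cast PySem.Int.mod_natCast l.length 2,
    show PySem.Int.floordiv (l.length : Int) 2 = ((l.length / 2 : Nat) : Int) from by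
      exact_mod_cast PySem.Int.floordiv_natCast l.length 2]
  by_cases h : l.length % 2 = 0
  · rw [if_pos (by simp [h]), PySem.List.slice_from_natCast,
      show l.length / 2 = (l.length + 1) / 2 by omega]
  · rw [if_neg (by simp; omega),
      show ((l.length / 2 : Nat) : Int) + 1 = (((l.length + 1) / 2 : Nat) : Int) by push_cast; omega,
      PySem.List.slice_from_natCast]

theorem pvCheckA_iff (l : List Char) : pvCheckA l = true ↔ l = l.reverse := by
  unfold pvCheckA
  rw [List.all_eq_true]
  constructor
  · intro h
    apply List.ext_getElem (by simp)
    intro k hk hk'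
    have hmem : (k : Int) ∈ PySem.List.pyRange 0 (PySem.List.len l) 1 := by
      rw [PySem.List.mem_pyRange_one]
      simp [PySem.List.len_eq]; omega
    have := h _ hmem
    rw [beq_iff_eq] at this
    rw [show (PySem.List.len l - (k : Int) - 1) = ((l.length - 1 - k : Nat) : Int) by
      simp [PySem.List.len_eq]; omega] at this
    simp only [PySem.List.pyGet?_natCast] at this
    rw [List.getElem?_eq_getElem hk, List.getElem?_eq_getElem (by omega)] at this
    rw [List.getElem_reverse]
    exact Option.some.inj this
  · intro h i hmem
    rw [PySem.List.mem_pyRange_one] at hmem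
    simp only [PySem.List.len_eq] at hmem ⊢
    obtain ⟨h0, hlt⟩ := hmem
    have hk : i.toNat < l.length := by omega
    rw [beq_iff_eq,
      show i = ((i.toNat : Nat) : Int) by omega,
      show ((l.length : Int) - ((i.toNat : Nat) : Int) - 1) = ((l.length - 1 - i.toNat : Nat) : Int) by omega]
    simp only [PySem.List.pyGet?_natCast]
    conv_lhs => rw [h]
    rw [List.getElem?_reverse (by simpa using hk)]

theorem pvBackA_rev (l : List Char) (h : l = l.reverse) :
    pvBackA l = (pvFrontA l).reverse := by
  rw [pvFrontA_eq, pvBackA_eq, List.reverse_take, ← h,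
    show l.length - l.length / 2 = (l.length + 1) / 2 by omega]

-- pvPanA is invariant under reversal (no induction needed: a passed check means l = l.reverse)
theorem pvPanA_rev (f : Nat) (l : List Char) : pvPanA f l.reverse = pvPanA f l := by
  cases f with
  | zero => rfl
  | succ f =>
    simp only [pvPanA, List.length_reverse]
    by_cases h1 : l.length == 1
    · simp [h1]
    · simp only [h1]
      by_cases hc : pvCheckA l
      · have hpal : l = l.reverse := (pvCheckA_iff l).mp hc
        rw [← hpal]
      · have hc' : pvCheckA l.reverse = false := by
          rw [Bool.eq_false_iff]
          intro hr
          have := (pvCheckA_iff l.reverse).mp hr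
          simp at this
          exact (Bool.eq_false_iff.mp (Bool.not_eq_true _ ▸ (by simpa using hc))) ((pvCheckA_iff l).mpr this.symm)
        simp [hc, hc']

theorem pvPan_agree (n : Nat) : ∀ (l : List Char), l.length ≤ n → l ≠ [] →
    ∀ (f : Nat), l.length ≤ f → pvPanA f l = pvPanB l := by
  induction n with
  | zero => intro l hn hne _ _; exact absurd (List.eq_nil_of_length_eq_zero (by omega)) hne
  | succ n ih =>
    intro l hn hne f hf
    have hlen : 1 ≤ l.length := List.length_pos_of_ne_nil hne
    obtain ⟨f, rfl⟩ : ∃ g, f = g + 1 := ⟨f - 1, by omega⟩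
    by_cases h1 : l.length = 1
    · simp [pvPanA, pvPanB, h1]
    · have h2 : 1 < l.length := by omega
      rw [pvPanB]
      simp only [pvPanA, if_pos h2]
      rw [if_neg (by simpa using h1)]
      by_cases hc : pvCheckA l
      · have hpal : l = l.reverse := (pvCheckA_iff l).mp hc
        rw [if_pos hc, if_neg (by simpa using hpal), pvBackA_rev l hpal, pvPanA_rev,
          Bool.and_self, pvFrontA_eq]
        have hfl : (l.take (l.length / 2)).length = l.length / 2 := by simp; omega
        exact ih _ (by omega) (by intro h; rw [h] at hfl; simp at hfl; omega) f (by omega)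
      · rw [if_neg hc, if_pos]
        intro hpal
        exact (Bool.eq_false_iff.mp (by simpa using hc)) ((pvCheckA_iff l).mpr hpal)

-- ===== VERDICT (by name: the statement is the Claim_ definition above) =====
theorem if_pan_spec : Claim_equal_if_pan := by
  intro s _ hpre
  unfold Spec_if_pan if_pan if_pan_alt
  have hne : s.toList ≠ [] := fun h => hpre (String.toList_eq_nil_iff.mp h)
  exact pvPan_agree s.toList.length s.toList le_rfl hne _ (by omega)

@[simp] theorem if_pan_raises : Claim_raises_if_pan := by
  unfold Claim_raises_if_pan
  refine ⟨fun s _ hr hp => hp hr, by decide, rfl, ?_⟩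
  show pvPanB [] = pvRaiseWitnessOut_if_pan
  rw [pvPanB]; rfl
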